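-- pv_equiv track=rewrite | github.com/vamsiramakrishnan/adk-fluent | shared/scripts/concepts_generator.py | _extract_three_channels
-- ===== SOURCE A (Python) =====
-- def _extract_three_channels(lines: list[str]) -> list[str]:
--     """Extract the '## The Three Channels' H2 block up to the next H1.
--
--     Raises ValueError if the heading is not found so drift in the source
--     spec surfaces loudly instead of producing a silent 4-line stub.
--     """
--     extracting = False
--     collected: list[str] = []
--     for line in lines:
--         if line.startswith("## The Three Channels"):
--             extracting = True
--         elif extracting and line.startswith("# "):
--             break
--         if extracting:
--             collected.append(line)
--
--     if not collected:
--         raise ValueError(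
--             "concepts_generator: '## The Three Channels' heading not found in "
--             "adk_fluent_v51_state_thesis.md. Was the heading renamed?"
--         )
--     return collected
-- ===== SOURCE B (Python) =====
-- def _extract_three_channels(lines: list[str]) -> list[str]:
--     """Two boundary searches + a slice instead of a flag-driven accumulation loop."""
--     start = next(
--         (i for i, line in enumerate(lines)
--          if line.startswith("## The Three Channels")),
--         None,
--     )
--     if start is None:
--         raise ValueError(
--             "concepts_generator: '## The Three Channels' heading not found in "
--             "adk_fluent_v51_state_thesis.md. Was the heading renamed?"
--         )
--     end = next(
--         (j for j in range(start + 1, len(lines))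
--          if lines[j].startswith("# ")),
--         len(lines),
--     )
--     return lines[start:end]
-- ===== Notes on version B (the rewrite author's own statement) =====
-- stated objective: simpler
-- what changed: Replaced the flag-driven accumulation loop (extracting bool, append, break) with two explicit boundary searches (first heading index, first following H1 index) and a single list slice.
import Mathlib
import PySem

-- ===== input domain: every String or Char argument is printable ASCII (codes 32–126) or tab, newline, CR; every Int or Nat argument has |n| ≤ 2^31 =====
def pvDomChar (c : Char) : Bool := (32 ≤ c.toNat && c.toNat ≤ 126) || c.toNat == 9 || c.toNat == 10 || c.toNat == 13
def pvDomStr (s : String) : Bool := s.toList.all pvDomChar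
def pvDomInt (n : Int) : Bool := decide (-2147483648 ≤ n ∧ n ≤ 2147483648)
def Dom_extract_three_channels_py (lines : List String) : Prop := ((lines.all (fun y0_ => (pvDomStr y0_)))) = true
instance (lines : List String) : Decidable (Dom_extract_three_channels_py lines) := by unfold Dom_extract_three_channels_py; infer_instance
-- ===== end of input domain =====

-- B replaces A's flag-driven accumulation loop by two boundary searches and a slice; objective: simpler.

-- ===== PORT A =====
-- the for-loop of A: state = (extracting, collected); 'break' returns collected immediately
def pvLoopA : List String → Bool → List String → List String
  | [], _, col => col
  | l :: rest, ext, col =>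
    if PySem.Str.startswith l "## The Three Channels" then
      pvLoopA rest true (col ++ [l])
    else if ext && PySem.Str.startswith l "# " then col
    else if ext then pvLoopA rest ext (col ++ [l])
    else pvLoopA rest ext col

def extract_three_channels_py (lines : List String) : List String :=
  pvLoopA lines false []

-- ===== PORT B =====
def extract_three_channels_py_alt (lines : List String) : List String :=
  match List.findIdx? (fun l => PySem.Str.startswith l "## The Three Channels") lines with
  | none => []   -- Source B raises ValueError here (outside Pre_)
  | some s =>
    -- end = first j in range(start+1, len(lines)) with lines[j].startswith('# '), default len(lines)
    let e : Nat :=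
      match List.findIdx? (fun l => PySem.Str.startswith l "# ") (lines.drop (s + 1)) with
      | none => lines.length
      | some k => s + 1 + k
    -- lines[start:end] with 0 ≤ s ≤ e ≤ len: exact as drop-then-take
    (lines.drop s).take (e - s)

-- ===== PRECONDITION & SPEC =====
-- A raises ValueError when no line starts with the heading (collected stays empty); B raises there too.
def Pre_extract_three_channels_py (lines : List String) : Prop :=
  ∃ l ∈ lines, PySem.Str.startswith l "## The Three Channels" = true
instance (lines : List String) : Decidable (Pre_extract_three_channels_py lines) := by
  unfold Pre_extract_three_channels_py; infer_instance

def pvWitness_extract_three_channels_py : List String :=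
  ["# Doc", "## The Three Channels", "body", "# Next"]

def Spec_extract_three_channels_py (lines : List String) (out : List String) : Prop := out = extract_three_channels_py_alt lines
instance (lines : List String) (out : List String) : Decidable (Spec_extract_three_channels_py lines out) := by unfold Spec_extract_three_channels_py; infer_instance

-- ===== CLAIM (what is proved, stated in full; the proofs are below) =====
def Claim_equal_extract_three_channels_py : Prop := ∀ (lines : List String), Dom_extract_three_channels_py lines → Pre_extract_three_channels_py lines → Spec_extract_three_channels_py lines (extract_three_channels_py lines)

-- ===== LEMMAS AND PROOFS =====

-- a heading line never starts with "# "
theorem pv_heading_not_h1 {l : String}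
    (h : PySem.Str.startswith l "## The Three Channels" = true) :
    PySem.Str.startswith l "# " = false := by
  simp only [PySem.Str.startswith_eq] at h ⊢
  by_contra hc
  rw [Bool.not_eq_false] at hc
  have h2 := List.prefix_or_prefix_of_prefix ((PySem.Chars.startswith_iff _ _).1 hc)
    ((PySem.Chars.startswith_iff _ _).1 h)
  rcases h2 with h2 | h2 <;> revert h2 <;> decide

-- once extracting, the loop collects the prefix up to the first "# " line
theorem pvLoopA_true (ls : List String) (col : List String) :
    pvLoopA ls true col =
      col ++ (match List.findIdx? (fun l => PySem.Str.startswith l "# ") ls with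
              | none => ls
              | some k => ls.take k) := by
  induction ls generalizing col with
  | nil => simp [pvLoopA]
  | cons l rest ih =>
    by_cases hh : PySem.Str.startswith l "## The Three Channels" = true
    · have h1 := pv_heading_not_h1 hh
      simp only [pvLoopA, hh, if_true, List.findIdx?_cons, h1, ih]
      cases List.findIdx? (fun l => PySem.Str.startswith l "# ") rest <;> simp
    · by_cases h1 : PySem.Str.startswith l "# " = true
      · simp only [pvLoopA, hh, h1, Bool.true_and, if_true, List.findIdx?_cons]
        simp
      · simp only [Bool.not_eq_true] at h1
        simp only [pvLoopA, hh, h1, Bool.and_false, if_true, List.findIdx?_cons, ih]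
        cases List.findIdx? (fun l => PySem.Str.startswith l "# ") rest <;> simp

theorem pv_main (lines : List String) :
    pvLoopA lines false [] = extract_three_channels_py_alt lines := by
  induction lines with
  | nil => simp [pvLoopA, extract_three_channels_py_alt]
  | cons l rest ih =>
    by_cases hh : PySem.Str.startswith l "## The Three Channels" = true
    · simp only [extract_three_channels_py_alt, List.findIdx?_cons, hh]
      simp only [pvLoopA, hh, if_true, pvLoopA_true, List.nil_append]
      rw [List.drop_succ_cons, List.drop_zero]
      cases hf : List.findIdx? (fun l => PySem.Str.startswith l "# ") rest with
      | none => simp [List.take_of_length_le]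
      | some k =>
        have h1 : 0 + 1 + k - 0 = k + 1 := by omega
        simp [h1, List.take_succ_cons]
    · simp only [Bool.not_eq_true] at hh
      have hA : pvLoopA (l :: rest) false [] = pvLoopA rest false [] := by
        simp only [pvLoopA, hh, Bool.false_and, Bool.false_eq_true, if_false]
      rw [hA, ih]
      simp only [extract_three_channels_py_alt, List.findIdx?_cons, hh]
      cases hf : List.findIdx? (fun l => PySem.Str.startswith l "## The Three Channels") rest with
      | none => simp
      | some s =>
        simp only [Bool.false_eq_true, if_false, Option.map_some, List.drop_succ_cons,
          List.length_cons]
        cases hg : List.findIdx? (fun l => PySem.Str.startswith l "# ") (rest.drop (s + 1)) with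
        | none =>
          have h1 : rest.length + 1 - (s + 1) = rest.length - s := by omega
          simp only [h1]
        | some k =>
          have h1 : s + 1 + 1 + k - (s + 1) = s + 1 + k - s := by omega
          simp only [h1]

-- ===== VERDICT (by name: the statement is the Claim_ definition above) =====
theorem extract_three_channels_py_spec : Claim_equal_extract_three_channels_py := by
  intro lines _ _
  unfold Spec_extract_three_channels_py extract_three_channels_py
  exact pv_main lines
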